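-- pv_equiv track=rewrite | github.com/jki14/competitive-programming | 2020/withgoogle.com/kickstart/round-c/proa.py | solution
-- ===== SOURCE A (Python) =====
-- def solution(a, m):
--     foo, bar = 0, m
--     for e in a:
--         if bar == e:
--             bar -= 1
--             if bar == 0:
--                 foo += 1
--             else:
--                 continue
--         elif m == e:
--             bar = m - 1
--             continue
--         bar = m
--     return foo
-- ===== SOURCE B (Python) =====
-- def solution(a, m):
--     if m <= 0 or m > len(a):
--         return 0
--     target = list(range(m, 0, -1))
--     return sum(1 for i in range(len(a) - m + 1) if a[i:i+m] == target)
-- ===== Notes on version B (the rewrite author's own statement) =====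
-- stated objective: simpler
-- what changed: A's single-pass matching automaton (state machine tracking the next expected value) is replaced by building the target pattern list(range(m,0,-1)) once and counting the windows a[i:i+m] equal to it.
import Mathlib
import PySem

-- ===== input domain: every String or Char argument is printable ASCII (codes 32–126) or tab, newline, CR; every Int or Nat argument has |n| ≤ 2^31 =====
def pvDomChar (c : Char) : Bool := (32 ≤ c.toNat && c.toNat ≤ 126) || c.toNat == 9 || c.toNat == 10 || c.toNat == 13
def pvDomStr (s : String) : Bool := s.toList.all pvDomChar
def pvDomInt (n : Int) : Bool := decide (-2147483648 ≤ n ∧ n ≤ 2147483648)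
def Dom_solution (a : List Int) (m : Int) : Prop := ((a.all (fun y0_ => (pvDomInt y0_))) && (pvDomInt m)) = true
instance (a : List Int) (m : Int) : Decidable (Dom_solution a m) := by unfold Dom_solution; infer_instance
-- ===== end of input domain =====

-- B replaces A's one-pass matching automaton with build-the-target-once and compare each
-- window a[i:i+m] against it (objective: alternative/simpler to read; no speed claim).

-- ===== PORT A =====
-- one iteration of A's for-loop over state (foo, bar)
def stepA (m : Int) : Int × Int → Int → Int × Int
  | (foo, bar), e =>
    if bar = e then
      (if bar - 1 = 0 then (foo + 1, m) else (foo, bar - 1))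
    else if m = e then (foo, m - 1)
    else (foo, m)

def solution (a : List Int) (m : Int) : Int :=
  (a.foldl (stepA m) (0, m)).1

-- ===== PORT B =====
def solution_alt (a : List Int) (m : Int) : Int :=
  if m ≤ 0 ∨ (a.length : Int) < m then 0
  else
    let target := PySem.List.pyRange m 0 (-1)
    (PySem.List.pyRange 0 ((a.length : Int) - m + 1) 1).foldl
      (fun c i => if PySem.List.slice a (some i) (some (i + m)) = target then c + 1 else c) 0

-- ===== PRECONDITION & SPEC =====
def Spec_solution (a : List Int) (m : Int) (out : Int) : Prop := out = solution_alt a m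
instance (a : List Int) (m : Int) (out : Int) : Decidable (Spec_solution a m out) := by unfold Spec_solution; infer_instance

-- ===== CLAIM (what is proved, stated in full; the proofs are below) =====
def Claim_equal_solution : Prop := ∀ (a : List Int) (m : Int), Dom_solution a m → Spec_solution a m (solution a m)

-- ===== LEMMAS AND PROOFS =====

-- the pattern [m, m-1, ..., 1]
def descN : Nat → List Int
  | 0 => []
  | k + 1 => ((k : Int) + 1) :: descN k

-- window count, by left recursion: a match starting at 0 plus the matches in the tail
def W (m : Nat) : List Int → Int
  | [] => 0
  | e :: r => (if (e :: r).take m = descN m then 1 else 0) + W m r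

lemma descN_length (k : Nat) : (descN k).length = k := by
  induction k with
  | zero => rfl
  | succ k ih => simp [descN, ih]

lemma descN_succ (k : Nat) : descN (k + 1) = ((k : Int) + 1) :: descN k := rfl

lemma take_cons_descN (m : Nat) (hm : 1 ≤ m) (e : Int) (r : List Int) :
    (e :: r).take m = descN m ↔ e = (m : Int) ∧ r.take (m - 1) = descN (m - 1) := by
  obtain ⟨k, rfl⟩ : ∃ k, m = k + 1 := ⟨m - 1, by omega⟩
  rw [descN_succ, List.take_succ_cons, Nat.add_sub_cancel, List.cons_eq_cons]
  constructor
  · rintro ⟨h1, h2⟩; refine ⟨?_, h2⟩; rw [h1]; push_cast; ring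
  · rintro ⟨h1, h2⟩; refine ⟨?_, h2⟩; rw [h1]; push_cast; ring

lemma take_short_ne_descN (m : Nat) (a : List Int) (h : a.length < m) :
    a.take m ≠ descN m := by
  intro hc
  have := congrArg List.length hc
  rw [List.length_take, descN_length] at this
  omega

lemma W_short (m : Nat) : ∀ a : List Int, a.length < m → W m a = 0 := by
  intro a
  induction a with
  | nil => intro _; rfl
  | cons e r ih =>
    intro h
    rw [List.length_cons] at h
    simp only [W]
    rw [if_neg (take_short_ne_descN m (e :: r) (by rw [List.length_cons]; omega))]
    rw [ih (by omega)]
    ring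

-- count-into-accumulator fold = countP
lemma foldl_count (p : Int → Prop) [DecidablePred p] :
    ∀ (l : List Int) (c : Int),
      l.foldl (fun c i => if p i then c + 1 else c) c
        = c + ((l.countP (fun i => decide (p i))) : Int) := by
  intro l
  induction l with
  | nil => intro c; simp
  | cons x l ih =>
    intro c
    rw [List.foldl_cons, List.countP_cons]
    by_cases hx : p x
    · rw [if_pos hx, ih]
      simp [hx]
      omega
    · rw [if_neg hx, ih]
      simp [hx]

-- window count over an index range = W
lemma count_windows (m : Nat) (hm : 1 ≤ m) :
    ∀ a : List Int,
      (((List.range (a.length + 1 - m)).countP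
          (fun k => decide ((a.drop k).take m = descN m))) : Int) = W m a := by
  intro a
  induction a with
  | nil =>
    have h0 : (([] : List Int).length + 1 - m) = 0 := by simp; omega
    rw [h0]
    simp [W]
  | cons e r ih =>
    by_cases hlen : m ≤ r.length + 1
    · have hn : (e :: r).length + 1 - m = (r.length + 1 - m) + 1 := by
        rw [List.length_cons]; omega
      rw [hn, List.range_succ_eq_map, List.countP_cons, List.countP_map]
      have hcomp :
          ((fun k => decide (((e :: r).drop k).take m = descN m)) ∘ Nat.succ)
            = fun k => decide ((r.drop k).take m = descN m) := by
        funext k; simp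
      rw [hcomp]
      simp only [List.drop_zero, W]
      push_cast
      rw [ih]
      by_cases h : (e :: r).take m = descN m
      · rw [if_pos h]; simp [h]; ring
      · rw [if_neg h]; simp [h]
    · have hn : (e :: r).length + 1 - m = 0 := by rw [List.length_cons]; omega
      rw [hn]
      simp only [List.range_zero, List.countP_nil, W]
      rw [if_neg (take_short_ne_descN m (e :: r) (by rw [List.length_cons]; omega))]
      rw [W_short m r (by omega)]
      simp

-- the automaton invariant: from state bar (1 ≤ bar ≤ m) the produced count is the possible
-- completion of the in-progress partial match plus all window matches of the rest
lemma keyA (m : Nat) (hm : 1 ≤ m) :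
    ∀ (a : List Int) (bar : Nat), 1 ≤ bar → bar ≤ m → ∀ foo : Int,
      (a.foldl (stepA (m : Int)) (foo, (bar : Int))).1
        = foo + (if bar < m ∧ a.take bar = descN bar then 1 else 0) + W m a := by
  intro a
  induction a with
  | nil =>
    intro bar h1 h2 foo
    have hd : descN bar ≠ [] := by
      obtain ⟨k, rfl⟩ : ∃ k, bar = k + 1 := ⟨bar - 1, by omega⟩
      simp [descN_succ]
    simp only [List.foldl_nil, W, List.take_nil]
    rw [if_neg (show ¬ (bar < m ∧ [] = descN bar) by rintro ⟨-, h⟩; exact hd h.symm)]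
    ring
  | cons e r ih =>
    intro bar h1 h2 foo
    rw [List.foldl_cons]
    by_cases he : (bar : Int) = e
    · by_cases hb1 : bar = 1
      · subst hb1
        have hstep : stepA (m : Int) (foo, ((1 : Nat) : Int)) e = (foo + 1, (m : Int)) := by
          simp only [stepA]
          rw [if_pos he]
          norm_num
        rw [hstep]
        have hIH := ih m hm le_rfl (foo + 1)
        rw [if_neg (show ¬ (m < m ∧ List.take m r = descN m) from
              fun h => absurd h.1 (lt_irrefl m))] at hIH
        rw [hIH]
        have ht : (e :: r).take 1 = descN 1 := by
          rw [List.take_succ_cons, List.take_zero]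
          simp [descN, ← he]
        by_cases hmm : m = 1
        · subst hmm
          simp only [W]
          rw [if_pos ht,
              if_neg (show ¬ ((1 : Nat) < 1 ∧ (e :: r).take 1 = descN 1) from
                fun h => absurd h.1 (lt_irrefl 1))]
          ring
        · have hne : (e :: r).take m ≠ descN m := by
            intro hc
            rcases (take_cons_descN m hm e r).mp hc with ⟨hc1, -⟩
            rw [← he] at hc1
            have : (1 : Nat) = m := by exact_mod_cast hc1
            omega
          simp only [W]
          rw [if_neg hne,
              if_pos (show (1 : Nat) < m ∧ (e :: r).take 1 = descN 1 from ⟨by omega, ht⟩)]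
          ring
      · -- 2 ≤ bar and e = bar: advance the partial match
        have hb2 : 2 ≤ bar := by omega
        have hstep : stepA (m : Int) (foo, (bar : Int)) e = (foo, ((bar - 1 : Nat) : Int)) := by
          simp only [stepA]
          rw [if_pos he, if_neg (show ¬ ((bar : Int) - 1 = 0) by omega)]
          congr 1
          omega
        rw [hstep, ih (bar - 1) (by omega) (by omega) foo]
        have hfirst : ((e :: r).take bar = descN bar) ↔ (r.take (bar - 1) = descN (bar - 1)) := by
          rw [take_cons_descN bar h1 e r]
          constructor
          · rintro ⟨-, h⟩; exact h
          · intro h; exact ⟨he.symm, h⟩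
        by_cases hbm : bar < m
        · have hne : (e :: r).take m ≠ descN m := by
            intro hc
            rcases (take_cons_descN m hm e r).mp hc with ⟨hc1, -⟩
            rw [← he] at hc1
            have : bar = m := by exact_mod_cast hc1
            omega
          simp only [W]
          rw [if_neg hne]
          by_cases hr : r.take (bar - 1) = descN (bar - 1)
          · rw [if_pos (show bar - 1 < m ∧ r.take (bar - 1) = descN (bar - 1) from
                  ⟨by omega, hr⟩),
                if_pos (show bar < m ∧ (e :: r).take bar = descN bar from
                  ⟨hbm, hfirst.mpr hr⟩)]
            ring
          · rw [if_neg (show ¬ (bar - 1 < m ∧ r.take (bar - 1) = descN (bar - 1)) from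
                  fun h => hr h.2),
                if_neg (show ¬ (bar < m ∧ (e :: r).take bar = descN bar) from
                  fun h => hr (hfirst.mp h.2))]
            ring
        · have hbm' : bar = m := by omega
          subst hbm'
          simp only [W]
          by_cases hr : r.take (bar - 1) = descN (bar - 1)
          · rw [if_pos (show bar - 1 < bar ∧ r.take (bar - 1) = descN (bar - 1) from
                  ⟨by omega, hr⟩),
                if_neg (show ¬ (bar < bar ∧ (e :: r).take bar = descN bar) from
                  fun h => absurd h.1 (lt_irrefl bar)),
                if_pos (hfirst.mpr hr)]
            ring
          · rw [if_neg (show ¬ (bar - 1 < bar ∧ r.take (bar - 1) = descN (bar - 1)) from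
                  fun h => hr h.2),
                if_neg (show ¬ (bar < bar ∧ (e :: r).take bar = descN bar) from
                  fun h => absurd h.1 (lt_irrefl bar)),
                if_neg (show ¬ ((e :: r).take bar = descN bar) from fun h => hr (hfirst.mp h))]
            ring
    · by_cases hme : (m : Int) = e
      · -- mismatch but e = m: restart with one element already matched
        have hbm : bar < m := by
          rcases lt_or_eq_of_le h2 with h | h
          · exact h
          · exfalso; apply he; rw [h]; exact hme
        have hm2 : 2 ≤ m := by omega
        have hstep : stepA (m : Int) (foo, (bar : Int)) e = (foo, ((m - 1 : Nat) : Int)) := by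
          simp only [stepA]
          rw [if_neg he, if_pos hme]
          congr 1
          omega
        rw [hstep, ih (m - 1) (by omega) (by omega) foo]
        have hfirst : ¬ ((e :: r).take bar = descN bar) := by
          intro hc
          rcases (take_cons_descN bar h1 e r).mp hc with ⟨hc1, -⟩
          exact he hc1.symm
        have hsecond : ((e :: r).take m = descN m) ↔ (r.take (m - 1) = descN (m - 1)) := by
          rw [take_cons_descN m hm e r]
          constructor
          · rintro ⟨-, h⟩; exact h
          · intro h; exact ⟨hme.symm, h⟩
        simp only [W]
        by_cases hr : r.take (m - 1) = descN (m - 1)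
        · rw [if_pos (show m - 1 < m ∧ r.take (m - 1) = descN (m - 1) from ⟨by omega, hr⟩),
              if_neg (show ¬ (bar < m ∧ (e :: r).take bar = descN bar) from
                fun h => hfirst h.2),
              if_pos (hsecond.mpr hr)]
          ring
        · rw [if_neg (show ¬ (m - 1 < m ∧ r.take (m - 1) = descN (m - 1)) from
                fun h => hr h.2),
              if_neg (show ¬ (bar < m ∧ (e :: r).take bar = descN bar) from
                fun h => hfirst h.2),
              if_neg (show ¬ ((e :: r).take m = descN m) from fun h => hr (hsecond.mp h))]
          ring
      · -- full restart
        have hstep : stepA (m : Int) (foo, (bar : Int)) e = (foo, (m : Int)) := by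
          simp only [stepA]
          rw [if_neg he, if_neg hme]
        rw [hstep, ih m hm le_rfl foo]
        have hfirst : ¬ ((e :: r).take bar = descN bar) := by
          intro hc
          rcases (take_cons_descN bar h1 e r).mp hc with ⟨hc1, -⟩
          exact he hc1.symm
        have hsecond : ¬ ((e :: r).take m = descN m) := by
          intro hc
          rcases (take_cons_descN m hm e r).mp hc with ⟨hc1, -⟩
          exact hme hc1.symm
        simp only [W]
        rw [if_neg (show ¬ (m < m ∧ List.take m r = descN m) from
              fun h => absurd h.1 (lt_irrefl m)),
            if_neg hsecond,
            if_neg (show ¬ (bar < m ∧ (e :: r).take bar = descN bar) from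
              fun h => hfirst h.2)]
        ring

-- m ≤ 0: the state never reaches 1, so the counter stays at foo
lemma keyNeg (m : Int) (hm : m ≤ 0) :
    ∀ (a : List Int) (bar : Int), bar ≤ 0 → ∀ foo : Int,
      (a.foldl (stepA m) (foo, bar)).1 = foo := by
  intro a
  induction a with
  | nil => intro bar _ foo; rfl
  | cons e r ih =>
    intro bar hbar foo
    rw [List.foldl_cons]
    by_cases he : bar = e
    · have hstep : stepA m (foo, bar) e = (foo, bar - 1) := by
        simp only [stepA]
        rw [if_pos he, if_neg (by omega)]
      rw [hstep]
      exact ih (bar - 1) (by omega) foo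
    · by_cases hme : m = e
      · have hstep : stepA m (foo, bar) e = (foo, m - 1) := by
          simp only [stepA]
          rw [if_neg he, if_pos hme]
        rw [hstep]
        exact ih (m - 1) (by omega) foo
      · have hstep : stepA m (foo, bar) e = (foo, m) := by
          simp only [stepA]
          rw [if_neg he, if_neg hme]
        rw [hstep]
        exact ih m hm foo

lemma descN_eq_pyRange (k : Nat) : PySem.List.pyRange (k : Int) 0 (-1) = descN k := by
  induction k with
  | zero => simp [PySem.List.pyRange_neg_one_eq_nil, descN]
  | succ k ih =>
    have hcast : (((k + 1 : Nat)) : Int) = (k : Int) + 1 := by push_cast; ring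
    rw [hcast, PySem.List.pyRange_neg_one_cons (by omega),
        show (k : Int) + 1 - 1 = (k : Int) from by ring, ih, descN_succ]

lemma solution_alt_eq_W (a : List Int) (m : Nat) (hm : 1 ≤ m) :
    solution_alt a (m : Int) = W m a := by
  unfold solution_alt
  by_cases hlen : (a.length : Int) < (m : Int)
  · rw [if_pos (Or.inr hlen), W_short m a (by exact_mod_cast hlen)]
  · rw [if_neg (by omega)]
    simp only
    rw [descN_eq_pyRange m,
        foldl_count (fun i => PySem.List.slice a (some i) (some (i + (m : Int))) = descN m),
        PySem.List.pyRange_one, List.countP_map]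
    have harith : (((a.length : Int) - (m : Int) + 1) - 0).toNat = a.length + 1 - m := by omega
    rw [harith]
    have hcomp :
        ((fun i => decide (PySem.List.slice a (some i) (some (i + (m : Int))) = descN m))
            ∘ (fun k : Nat => (0 : Int) + (k : Int)))
          = fun k : Nat => decide ((a.drop k).take m = descN m) := by
      funext k
      simp only [Function.comp_apply, zero_add]
      rw [PySem.List.slice_natCast_add]
    rw [hcomp, count_windows m hm a]
    ring

-- ===== VERDICT (by name: the statement is the Claim_ definition above) =====
theorem solution_spec : Claim_equal_solution := by
  intro a m _
  unfold Spec_solution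
  by_cases hm : m ≤ 0
  · rw [show solution a m = 0 from keyNeg m hm a m hm 0]
    simp [solution_alt, hm]
  · obtain ⟨k, rfl⟩ : ∃ k : Nat, m = (k : Int) :=
      ⟨m.toNat, (Int.toNat_of_nonneg (by omega)).symm⟩
    have hk : 1 ≤ k := by omega
    unfold solution
    rw [keyA k hk a k hk le_rfl 0]
    rw [solution_alt_eq_W a k hk]
    rw [if_neg (by rintro ⟨hc, -⟩; exact absurd hc (lt_irrefl k))]
    ring
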